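-- pv_equiv track=rewrite | github.com/Jorgro/ITGK | Eksamensoppgaver/Python 2011/Oppgave 4.py | most_highscores
-- ===== SOURCE A (Python) =====
-- def most_highscores(scores):
--     list_all = list(scores.items())
--     newList = []
--     for i in list_all:
--         newList.append(i[1][0])
--     max = 1
--     index = 0
--     for i in newList:
--         if newList.count(i) > max:
--             max = newList.count(i)
--             index = newList.index(i)
--
--     return newList[index]
-- ===== SOURCE B (Python) =====
-- def most_highscores(scores):
--     firsts = [v[0] for v in scores.values()]
--     s = sorted(firsts)
--     best_count, best_pos, best_val = 0, 0, None
--     i, n = 0, len(s)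
--     while i < n:
--         j = i
--         while j < n and s[j] == s[i]:
--             j += 1
--         count, pos = j - i, firsts.index(s[i])
--         if count > best_count or (count == best_count and pos < best_pos):
--             best_count, best_pos, best_val = count, pos, s[i]
--         i = j
--     return best_val
-- ===== Notes on version B (the rewrite author's own statement) =====
-- stated objective: faster
-- what changed: Replaces A's running-max loop that rescans the whole list with list.count/list.index at every element by a sort-then-run-length algorithm: sort the first scores, walk the sorted list run by run (each distinct value once), take the run length as its count, and keep the best (count, first-occurrence position) pair - the position tie-break reproduces A's first-occurrence-wins rule.
import Mathlib
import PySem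

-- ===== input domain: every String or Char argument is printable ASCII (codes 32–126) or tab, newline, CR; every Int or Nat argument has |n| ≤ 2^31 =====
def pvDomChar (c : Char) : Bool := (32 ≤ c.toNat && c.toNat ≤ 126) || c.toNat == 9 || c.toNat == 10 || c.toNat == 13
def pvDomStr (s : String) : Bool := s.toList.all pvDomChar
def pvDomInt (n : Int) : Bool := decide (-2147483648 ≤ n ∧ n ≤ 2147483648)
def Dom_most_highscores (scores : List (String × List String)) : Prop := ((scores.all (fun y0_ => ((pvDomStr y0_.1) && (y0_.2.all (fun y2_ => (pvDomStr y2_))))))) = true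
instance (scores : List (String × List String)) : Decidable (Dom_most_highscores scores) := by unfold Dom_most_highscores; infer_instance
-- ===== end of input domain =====

-- B replaces A's rescanning running-max loop (list.count/list.index on the whole list at every element)
-- by sorting the first scores and scanning the sorted list run by run, keeping the best (count, first-position)
-- pair; measured faster (see claim). Equivalence is proved on Pre_ (nonempty dict, nonempty value lists).


-- ===== PORT A =====
def most_highscores (scores : List (String × List String)) : String :=
  let list_all := scores
  let newList := list_all.foldl (fun acc i => acc ++ [(PySem.List.pyGet? i.2 0).getD ""]) []
  let st := newList.foldl
    (fun (s : Int × Int) i =>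
      if ((PySem.List.count newList i : Int)) > s.1 then
        ((PySem.List.count newList i : Int), (((PySem.List.index? newList i).getD 0 : Nat) : Int))
      else s)
    (1, 0)
  (PySem.List.pyGet? newList st.2).getD ""

-- ===== PORT B =====
-- the while-loop of Source B: the inner 'while j: j += 1' over equal elements is the run 'takeWhile (== head)',
-- 'i = j' is 'dropWhile (== head)'; best = (best_count, best_pos, best_val), best_val none = Python's None
-- (rendered "" by the caller; inside Pre_ the loop always runs and best_val is some _).
def bScan (firsts : List String) : List String → (Int × Int × Option String) → (Int × Int × Option String)
  | [], best => best
  | x :: rest, best =>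
      let cnt : Int := 1 + ((rest.takeWhile (fun y => y == x)).length : Int)
      let pos : Int := (((PySem.List.index? firsts x).getD 0 : Nat) : Int)
      let best' := if cnt > best.1 ∨ (cnt = best.1 ∧ pos < best.2.1) then (cnt, pos, some x) else best
      bScan firsts (rest.dropWhile (fun y => y == x)) best'
  termination_by l => l.length
  decreasing_by
    exact Nat.lt_succ_of_le (List.Sublist.length_le (List.dropWhile_sublist _))

def most_highscores_alt (scores : List (String × List String)) : String :=
  let firsts := scores.map (fun v => (PySem.List.pyGet? v.2 0).getD "")
  let s := PySem.List.sorted firsts (fun x => x) false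
  (bScan firsts s (0, 0, none)).2.2.getD ""

-- ===== PRECONDITION & SPEC =====
-- Pre_ excludes exactly the inputs on which Python A raises IndexError: the empty dict
-- (newList[index] on an empty list) and dicts containing an empty value list (i[1][0]).
def Pre_most_highscores (scores : List (String × List String)) : Prop :=
  scores ≠ [] ∧ (scores.all (fun p => !p.2.isEmpty)) = true
instance (scores : List (String × List String)) : Decidable (Pre_most_highscores scores) := by unfold Pre_most_highscores; infer_instance
def pvWitness_most_highscores : (List (String × List String)) := [("amy", ["10", "3"]), ("bob", ["10"])]
def Spec_most_highscores (scores : List (String × List String)) (out : String) : Prop := out = most_highscores_alt scores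
instance (scores : List (String × List String)) (out : String) : Decidable (Spec_most_highscores scores out) := by unfold Spec_most_highscores; infer_instance

-- ===== CLAIM (what is proved, stated in full; the proofs are below) =====
def Claim_equal_most_highscores : Prop := ∀ (scores : List (String × List String)), Dom_most_highscores scores → Pre_most_highscores scores → Spec_most_highscores scores (most_highscores scores)

-- ===== LEMMAS AND PROOFS =====

-- 'first argmax' combinator, preferring the LEFT argument on ties (A's strict '>' rule)
def fmMerge {α : Type} (k : α → Int) : Option α → Option α → Option α
  | none, b => b
  | some m, none => some m
  | some m, some r => if k m < k r then some r else some m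

-- the first element of the list attaining the maximal key
def firstMax {α : Type} (k : α → Int) : List α → Option α
  | [] => none
  | x :: xs => fmMerge k (some x) (firstMax k xs)

theorem fmMerge_some_left {α : Type} (k : α → Int) (m : α) (b : Option α) :
    ∃ q, fmMerge k (some m) b = some q := by
  cases b with
  | none => exact ⟨m, rfl⟩
  | some r =>
    simp only [fmMerge]
    split_ifs
    · exact ⟨r, rfl⟩
    · exact ⟨m, rfl⟩

theorem firstMax_cons_some {α : Type} (k : α → Int) (x : α) (xs : List α) :
    ∃ q, firstMax k (x :: xs) = some q := by
  show ∃ q, fmMerge k (some x) (firstMax k xs) = some q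
  exact fmMerge_some_left k x (firstMax k xs)

theorem firstMax_some_of_ne_nil {α : Type} (k : α → Int) (L : List α) (h : L ≠ []) :
    ∃ q, firstMax k L = some q := by
  cases L with
  | nil => exact absurd rfl h
  | cons x xs => exact firstMax_cons_some k x xs

theorem firstMax_isMax {α : Type} (k : α → Int) :
    ∀ (L : List α) (m : α), firstMax k L = some m → ∀ y ∈ L, k y ≤ k m := by
  intro L
  induction L with
  | nil => intro m _ y hy; simp at hy
  | cons x xs ih =>
    intro m h y hy
    have hh : fmMerge k (some x) (firstMax k xs) = some m := h
    rcases hx : firstMax k xs with _ | r <;> rw [hx] at hh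
    · have hxs : xs = [] := by
        cases xs with
        | nil => rfl
        | cons a t =>
          rcases firstMax_cons_some k a t with ⟨q, hq⟩
          rw [hq] at hx
          simp at hx
      subst hxs
      simp only [fmMerge] at hh
      rcases List.mem_cons.mp hy with h1 | h1
      · subst h1; injection hh with hh'; subst hh'; exact le_refl _
      · simp at h1
    · simp only [fmMerge] at hh
      split_ifs at hh with hlt
      · injection hh with hh'; subst hh'
        rcases List.mem_cons.mp hy with h1 | h1
        · subst h1; omega
        · exact ih r hx y h1
      · injection hh with hh'; subst hh'
        rcases List.mem_cons.mp hy with h1 | h1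
        · subst h1; exact le_refl _
        · have := ih r hx y h1; omega

theorem firstMax_mem {α : Type} (k : α → Int) :
    ∀ (L : List α) (m : α), firstMax k L = some m → m ∈ L := by
  intro L
  induction L with
  | nil => intro m h; simp [firstMax] at h
  | cons x xs ih =>
    intro m h
    have hh : fmMerge k (some x) (firstMax k xs) = some m := h
    rcases hx : firstMax k xs with _ | r <;> rw [hx] at hh
    · simp only [fmMerge] at hh
      injection hh with hh'; subst hh'
      exact List.mem_cons_self
    · simp only [fmMerge] at hh
      split_ifs at hh with hlt <;> injection hh with hh' <;> subst hh'
      · exact List.mem_cons_of_mem _ (ih r hx)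
      · exact List.mem_cons_self

-- firstMax picks the LEFTMOST element among those attaining the maximal key
theorem firstMax_leftmost {α : Type} [DecidableEq α] (k : α → Int) :
    ∀ (L : List α) (m : α), firstMax k L = some m →
      ∀ y ∈ L, k y = k m → L.idxOf m ≤ L.idxOf y := by
  intro L
  induction L with
  | nil => intro m h; simp [firstMax] at h
  | cons x xs ih =>
    intro m h y hy hky
    have hh : fmMerge k (some x) (firstMax k xs) = some m := h
    rcases hx : firstMax k xs with _ | r <;> rw [hx] at hh
    · -- xs = [], m = x
      simp only [fmMerge] at hh
      injection hh with hh'; subst hh'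
      simp [List.idxOf_cons]
    · simp only [fmMerge] at hh
      split_ifs at hh with hlt
      · -- m = r, k x < k m
        injection hh with hh'; subst hh'
        have hyx : y ≠ x := by
          intro he; rw [he] at hky; omega
        have hmx : r ≠ x := by
          intro he; rw [he] at hlt; omega
        have hyxs : y ∈ xs := by
          rcases List.mem_cons.mp hy with h1 | h1
          · exact absurd h1 hyx
          · exact h1
        have h1 : (x :: xs).idxOf r = xs.idxOf r + 1 := by
          simp [Ne.symm hmx]
        have h2 : (x :: xs).idxOf y = xs.idxOf y + 1 := by
          simp [Ne.symm hyx]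
        rw [h1, h2]
        exact Nat.succ_le_succ (ih r hx y hyxs hky)
      · -- m = x
        injection hh with hh'; subst hh'
        simp [List.idxOf_cons]

-- (index? F x).getD 0 is idxOf for a member
theorem index?_getD_of_mem (F : List String) (x : String) (h : x ∈ F) :
    (PySem.List.index? F x).getD 0 = F.idxOf x := by
  rw [PySem.List.index?_eq_idxOf?]
  induction F with
  | nil => simp at h
  | cons a t ih =>
    by_cases hax : a = x
    · subst hax; simp [List.idxOf?_cons, List.idxOf_cons]
    · have hx : x ∈ t := by
        rcases List.mem_cons.mp h with h1 | h1
        · exact absurd h1.symm hax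
        · exact h1
      have hne : (a == x) = false := by simp [hax]
      simp only [List.idxOf?_cons, List.idxOf_cons, hne, cond_false]
      rw [← ih hx]
      rcases ho : List.idxOf? x t with _ | n
      · rw [List.idxOf?_eq_none_iff] at ho; exact absurd hx ho
      · simp

theorem fmMerge_assoc {α : Type} (k : α → Int) (a b c : Option α) :
    fmMerge k (fmMerge k a b) c = fmMerge k a (fmMerge k b c) := by
  rcases a with _ | x
  · rfl
  rcases b with _ | y
  · rfl
  rcases c with _ | z
  · show fmMerge k (fmMerge k (some x) (some y)) none = fmMerge k (some x) (some y)
    rcases fmMerge_some_left k x (some y) with ⟨q, hq⟩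
    rw [hq]
    rfl
  show fmMerge k (if k x < k y then some y else some x) (some z)
      = fmMerge k (some x) (if k y < k z then some z else some y)
  by_cases h1 : k x < k y <;> by_cases h2 : k y < k z <;>
    simp only [if_pos, if_neg, h1, h2, if_true, if_false, fmMerge] <;>
    split_ifs <;> first | rfl | (exfalso; omega)

-- A's inner scan, started in a coherent state (count of v, index of v), computes firstMax
theorem scanA_spec (F : List String) :
    ∀ (S : List String) (v : String), v ∈ F → (∀ y ∈ S, y ∈ F) →
      S.foldl
        (fun (s : Int × Int) i =>
          if ((PySem.List.count F i : Int)) > s.1 then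
            ((PySem.List.count F i : Int), (((PySem.List.index? F i).getD 0 : Nat) : Int))
          else s)
        (((List.count v F : Int)), ((F.idxOf v : Nat) : Int))
      = (((List.count ((fmMerge (fun y => (List.count y F : Int)) (some v) (firstMax (fun y => (List.count y F : Int)) S)).getD v) F : Int)),
         ((F.idxOf ((fmMerge (fun y => (List.count y F : Int)) (some v) (firstMax (fun y => (List.count y F : Int)) S)).getD v) : Nat) : Int)) := by
  intro S
  induction S with
  | nil => intro v _ _; rfl
  | cons x S' ih =>
    intro v hv hS
    set k : String → Int := fun y => (List.count y F : Int) with hk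
    have hxF : x ∈ F := hS x List.mem_cons_self
    have hS' : ∀ y ∈ S', y ∈ F := fun y hy => hS y (List.mem_cons_of_mem _ hy)
    rw [List.foldl_cons]
    have hcnt : (PySem.List.count F x : Int) = k x := by
      simp [PySem.List.count_eq, hk]
    have hfm : firstMax k (x :: S') = fmMerge k (some x) (firstMax k S') := rfl
    by_cases hlt : k v < k x
    · have hcond : ((PySem.List.count F x : Int)) > ((List.count v F : Int)) := by
        rw [hcnt]; exact hlt
      rw [if_pos hcond, hcnt, index?_getD_of_mem F x hxF]
      rw [ih x hxF hS']
      rcases fmMerge_some_left k x (firstMax k S') with ⟨q, hq⟩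
      have hmv : fmMerge k (some v) (firstMax k (x :: S')) = some q := by
        rw [hfm, ← fmMerge_assoc]
        have h2 : fmMerge k (some v) (some x) = some x := by
          simp only [fmMerge]; rw [if_pos hlt]
        rw [h2, hq]
      rw [hq, hmv]
      rfl
    · have hcond : ¬ ((PySem.List.count F x : Int)) > ((List.count v F : Int)) := by
        rw [hcnt]; exact hlt
      rw [if_neg hcond]
      rw [ih v hv hS']
      have hmv : fmMerge k (some v) (firstMax k (x :: S')) = fmMerge k (some v) (firstMax k S') := by
        rw [hfm, ← fmMerge_assoc]
        have h2 : fmMerge k (some v) (some x) = some v := by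
          simp only [fmMerge]; rw [if_neg hlt]
        rw [h2]
      rw [hmv]

-- A's whole pipe on the list of firsts, as a standalone equation
theorem aSide (F : List String) (hF : F ≠ []) :
    (PySem.List.pyGet? F
      ((F.foldl
        (fun (s : Int × Int) i =>
          if ((PySem.List.count F i : Int)) > s.1 then
            ((PySem.List.count F i : Int), (((PySem.List.index? F i).getD 0 : Nat) : Int))
          else s)
        (1, 0)).2)).getD ""
    = (firstMax (fun y => (List.count y F : Int)) F).getD "" := by
  cases F with
  | nil => exact absurd rfl hF
  | cons f0 rest =>
    set k : String → Int := fun y => (List.count y (f0 :: rest) : Int) with hk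
    have hf0 : f0 ∈ (f0 :: rest) := List.mem_cons_self
    have hrest : ∀ y ∈ rest, y ∈ (f0 :: rest) := fun y hy => List.mem_cons_of_mem _ hy
    have hcpos : 0 < List.count f0 (f0 :: rest) := List.count_pos_iff.mpr hf0
    rw [List.foldl_cons]
    have hstep :
        (if ((PySem.List.count (f0 :: rest) f0 : Int)) > ((1 : Int), (0 : Int)).1 then
            ((PySem.List.count (f0 :: rest) f0 : Int), (((PySem.List.index? (f0 :: rest) f0).getD 0 : Nat) : Int))
          else ((1 : Int), (0 : Int)))
        = (((List.count f0 (f0 :: rest) : Int)), (((f0 :: rest).idxOf f0 : Nat) : Int)) := by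
      show (if ((PySem.List.count (f0 :: rest) f0 : Int)) > (1 : Int) then
          ((PySem.List.count (f0 :: rest) f0 : Int), (((PySem.List.index? (f0 :: rest) f0).getD 0 : Nat) : Int))
        else ((1 : Int), (0 : Int)))
        = (((List.count f0 (f0 :: rest) : Int)), (((f0 :: rest).idxOf f0 : Nat) : Int))
      have hidx : ((f0 :: rest).idxOf f0 : Nat) = 0 := by simp
      have hcnteq : PySem.List.count (f0 :: rest) f0 = List.count f0 (f0 :: rest) :=
        PySem.List.count_eq _ _
      by_cases hgt : ((PySem.List.count (f0 :: rest) f0 : Int)) > (1 : Int)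
      · rw [if_pos hgt, index?_getD_of_mem _ f0 hf0, hcnteq, hidx]
      · rw [if_neg hgt]
        have h1 : List.count f0 (f0 :: rest) = 1 := by
          rw [hcnteq] at hgt
          omega
        rw [hidx, h1]
        norm_num
    rw [hstep]
    rw [scanA_spec (f0 :: rest) rest f0 hf0 hrest]
    rcases fmMerge_some_left k f0 (firstMax k rest) with ⟨q, hq⟩
    have hfm : firstMax k (f0 :: rest) = some q := by
      rw [show firstMax k (f0 :: rest) = fmMerge k (some f0) (firstMax k rest) from rfl, hq]
    have hrr : (fmMerge k (some f0) (firstMax k rest)).getD f0 = q := by rw [hq]; rfl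
    rw [hrr]
    have hqmem : q ∈ (f0 :: rest) := firstMax_mem k _ q hfm
    have hlt : (f0 :: rest).idxOf q < (f0 :: rest).length := List.idxOf_lt_length_of_mem hqmem
    show (PySem.List.pyGet? (f0 :: rest) ((((f0 :: rest).idxOf q : Nat) : Int))).getD "" = _
    rw [PySem.List.pyGet?_natCast, List.getElem?_eq_getElem hlt]
    rw [hfm]
    simp [List.getElem_idxOf]

-- idxOf is injective on members of F
theorem idxOf_inj_of_mem (F : List String) (a b : String)
    (ha : a ∈ F) (hb : b ∈ F) (h : F.idxOf a = F.idxOf b) : a = b := by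
  have h1 : F[F.idxOf a]'(List.idxOf_lt_length_of_mem ha) = a := List.getElem_idxOf _
  have h2 : F[F.idxOf b]'(List.idxOf_lt_length_of_mem hb) = b := List.getElem_idxOf _
  rw [← h1, ← h2]
  congr 1

-- in a sorted (x :: rest), the whole x-run is rest.takeWhile (== x) and x never recurs afterwards
theorem sorted_run_facts (x : String) (rest : List String)
    (hp : (x :: rest).Pairwise (fun a b => a ≤ b)) :
    (∀ y ∈ rest.dropWhile (fun y => y == x), y ≠ x) ∧
    List.count x (x :: rest) = 1 + (rest.takeWhile (fun y => y == x)).length := by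
  have hsplit : rest = rest.takeWhile (fun y => y == x) ++ rest.dropWhile (fun y => y == x) :=
    (List.takeWhile_append_dropWhile).symm
  have htw : ∀ y ∈ rest.takeWhile (fun y => y == x), y = x := by
    intro y hy
    have := List.mem_takeWhile_imp hy
    simpa using this
  have hxle : ∀ y ∈ rest, x ≤ y := (List.pairwise_cons.mp hp).1
  have hdw : ∀ y ∈ rest.dropWhile (fun y => y == x), y ≠ x := by
    rcases hd : rest.dropWhile (fun y => y == x) with _ | ⟨b, B'⟩
    · intro y hy; simp at hy
    · have hbx : b ≠ x := by
        have := List.head?_dropWhile_not (fun y => y == x) rest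
        rw [hd] at this
        simpa using this
      have hrest : rest.Pairwise (fun a b => a ≤ b) := (List.pairwise_cons.mp hp).2
      have hbB : ∀ y ∈ B', b ≤ y := by
        have hsub : (b :: B').Sublist rest := by
          rw [hsplit, hd]
          exact List.sublist_append_right _ _
        have := hrest.sublist hsub
        exact (List.pairwise_cons.mp this).1
      have hxb : x < b := by
        have hbrest : b ∈ rest := by
          rw [hsplit, hd]; exact List.mem_append_right _ List.mem_cons_self
        exact lt_of_le_of_ne (hxle b hbrest) (Ne.symm hbx)
      intro y hy
      rcases List.mem_cons.mp hy with h1 | h1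
      · subst h1; exact hbx
      · intro he
        subst he
        exact absurd (hbB y h1) (not_le.mpr hxb)
  refine ⟨hdw, ?_⟩
  have hc1 : List.count x (rest.takeWhile (fun y => y == x))
      = (rest.takeWhile (fun y => y == x)).length := by
    apply List.count_eq_length.mpr
    intro y hy
    exact ((htw y hy).symm ▸ rfl)
  have hc2 : List.count x (rest.dropWhile (fun y => y == x)) = 0 := by
    apply List.count_eq_zero.mpr
    intro hx
    exact (hdw x hx) rfl
  rw [List.count_cons_self]
  conv_lhs => rw [hsplit]
  rw [List.count_append, hc1, hc2]
  omega

-- the bScan loop reaches (and then keeps) the firstMax record m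
theorem bScan_spec (F : List String) (m : String)
    (hm : firstMax (fun y => (List.count y F : Int)) F = some m) :
    ∀ (t : List String) (best : Int × Int × Option String),
      t.Pairwise (fun a b => a ≤ b) →
      (∀ y ∈ t, y ∈ F ∧ List.count y t = List.count y F) →
      ((best.2.2 = some m ∧ best.1 = (List.count m F : Int) ∧ best.2.1 = ((F.idxOf m : Nat) : Int) ∧ m ∉ t)
        ∨ (m ∈ t ∧ (best.1 < (List.count m F : Int)
             ∨ (best.1 = (List.count m F : Int) ∧ ((F.idxOf m : Nat) : Int) < best.2.1)))) →
      (bScan F t best).2.2 = some m := by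
  have main : ∀ (n : Nat) (t : List String), t.length ≤ n → ∀ (best : Int × Int × Option String),
      t.Pairwise (fun a b => a ≤ b) →
      (∀ y ∈ t, y ∈ F ∧ List.count y t = List.count y F) →
      ((best.2.2 = some m ∧ best.1 = (List.count m F : Int) ∧ best.2.1 = ((F.idxOf m : Nat) : Int) ∧ m ∉ t)
        ∨ (m ∈ t ∧ (best.1 < (List.count m F : Int)
             ∨ (best.1 = (List.count m F : Int) ∧ ((F.idxOf m : Nat) : Int) < best.2.1)))) →
      (bScan F t best).2.2 = some m := by
    intro n
    induction n with
    | zero =>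
      intro t hlen best hsort hcnt hinv
      have ht0 : t = [] := List.eq_nil_of_length_eq_zero (Nat.le_zero.mp hlen)
      subst ht0
      rcases hinv with ⟨h1, _, _, _⟩ | ⟨h1, _⟩
      · simpa [bScan] using h1
      · simp at h1
    | succ n ihn =>
      intro t hlen best hsort hcnt hinv
      cases t with
      | nil =>
        rcases hinv with ⟨h1, _, _, _⟩ | ⟨h1, _⟩
        · simpa [bScan] using h1
        · simp at h1
      | cons x rest =>
        set k : String → Int := fun y => (List.count y F : Int) with hk
        have hxF : x ∈ F := (hcnt x List.mem_cons_self).1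
        have hxcnt : List.count x (x :: rest) = List.count x F := (hcnt x List.mem_cons_self).2
        obtain ⟨hdw, hrun⟩ := sorted_run_facts x rest hsort
        set t' := rest.dropWhile (fun y => y == x) with ht'
        have hsplit : rest = rest.takeWhile (fun y => y == x) ++ t' :=
          (List.takeWhile_append_dropWhile).symm
        have ht'sub : t'.Sublist (x :: rest) := by
          refine List.Sublist.trans ?_ (List.sublist_cons_self x rest)
          rw [hsplit]
          exact List.sublist_append_right _ _
        have ht'sort : t'.Pairwise (fun a b => a ≤ b) := hsort.sublist ht'sub
        have ht'len : t'.length < (x :: rest).length :=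
          Nat.lt_succ_of_le (List.Sublist.length_le (List.dropWhile_sublist _))
        have ht'cnt : ∀ y ∈ t', y ∈ F ∧ List.count y t' = List.count y F := by
          intro y hy
          have hyrest : y ∈ rest := by
            rw [hsplit]; exact List.mem_append_right _ hy
          have hymem : y ∈ (x :: rest) := List.mem_cons_of_mem _ hyrest
          refine ⟨(hcnt y hymem).1, ?_⟩
          have hyx : y ≠ x := hdw y hy
          have h0 : List.count y (rest.takeWhile (fun z => z == x)) = 0 := by
            apply List.count_eq_zero.mpr
            intro hyt
            have := List.mem_takeWhile_imp hyt
            simp at this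
            exact hyx this
          have : List.count y (x :: rest) = List.count y t' := by
            rw [List.count_cons_of_ne (Ne.symm hyx)]
            conv_lhs => rw [hsplit]
            rw [List.count_append, h0]
            omega
          rw [← this]
          exact (hcnt y hymem).2
        -- the step's computed record for x
        have hcntx : (1 + ((rest.takeWhile (fun y => y == x)).length : Int)) = k x := by
          have : List.count x F = 1 + (rest.takeWhile (fun y => y == x)).length := by
            rw [← hxcnt]; exact hrun
          simp [hk, this]
        have hposx : (((PySem.List.index? F x).getD 0 : Nat) : Int) = ((F.idxOf x : Nat) : Int) := by
          rw [index?_getD_of_mem F x hxF]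
        rw [bScan]
        show (bScan F t'
          (if (1 + ((rest.takeWhile (fun y => y == x)).length : Int)) > best.1
                ∨ ((1 + ((rest.takeWhile (fun y => y == x)).length : Int)) = best.1
                    ∧ (((PySem.List.index? F x).getD 0 : Nat) : Int) < best.2.1)
            then ((1 + ((rest.takeWhile (fun y => y == x)).length : Int)),
                  (((PySem.List.index? F x).getD 0 : Nat) : Int), some x)
            else best)).2.2 = some m
        rw [hcntx, hposx]
        set best' := (if k x > best.1 ∨ (k x = best.1 ∧ ((F.idxOf x : Nat) : Int) < best.2.1)
            then (k x, ((F.idxOf x : Nat) : Int), some x) else best) with hbest'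
        apply ihn t' (Nat.le_of_lt_succ (Nat.lt_of_lt_of_le ht'len hlen)) best' ht'sort ht'cnt
        rcases hinv with ⟨hv, hc, hpos, hnot⟩ | ⟨hmt, hbeat⟩
        · -- best already holds m's record; x ≠ m cannot displace it
          have hxm : x ≠ m := by
            intro he; subst he; exact hnot List.mem_cons_self
          have hmF : m ∈ F := firstMax_mem k F m hm
          have hle : k x ≤ k m := firstMax_isMax k F m hm x hxF
          have hnotupd : ¬ (k x > best.1 ∨ (k x = best.1 ∧ ((F.idxOf x : Nat) : Int) < best.2.1)) := by
            rw [hc, hpos]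
            push_neg
            refine ⟨hle, ?_⟩
            intro heq
            have hidx : F.idxOf m ≤ F.idxOf x := by
              apply firstMax_leftmost k F m hm x hxF
              simpa [hk] using heq
            have hne : F.idxOf m ≠ F.idxOf x := by
              intro he
              exact hxm (idxOf_inj_of_mem F x m hxF hmF he.symm)
            have : F.idxOf m < F.idxOf x := lt_of_le_of_ne hidx hne
            push_cast
            omega
          left
          rw [hbest', if_neg hnotupd]
          refine ⟨hv, hc, hpos, ?_⟩
          intro hmt'
          exact hnot (ht'sub.mem hmt')
        · -- m still ahead
          by_cases hxm : x = m
          · -- this run IS m: best' becomes m's record, and m ∉ t'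
            subst hxm
            have hupd : k x > best.1 ∨ (k x = best.1 ∧ ((F.idxOf x : Nat) : Int) < best.2.1) := by
              rcases hbeat with h | ⟨h1, h2⟩
              · left; exact h
              · right; exact ⟨h1.symm, h2⟩
            left
            rw [hbest', if_pos hupd]
            refine ⟨rfl, rfl, rfl, ?_⟩
            intro hmt'
            exact (hdw x hmt') rfl
          · -- x ≠ m: whatever best' is, m (∈ t') still beats it
            have hmt' : m ∈ t' := by
              have hmrest : m ∈ rest := by
                rcases List.mem_cons.mp hmt with h1 | h1
                · exact absurd h1 (Ne.symm hxm)
                · exact h1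
              rw [hsplit] at hmrest
              rcases List.mem_append.mp hmrest with h1 | h1
              · have := List.mem_takeWhile_imp h1
                simp at this
                exact absurd this (Ne.symm hxm)
              · exact h1
            right
            refine ⟨hmt', ?_⟩
            have hmF : m ∈ F := firstMax_mem k F m hm
            have hle : k x ≤ k m := firstMax_isMax k F m hm x hxF
            rw [hbest']
            split_ifs with hupd
            · -- best' = x's record; m beats it
              by_cases heq : k x = k m
              · right
                constructor
                · simpa [hk] using heq
                · have hidx : F.idxOf m ≤ F.idxOf x := by
                    apply firstMax_leftmost k F m hm x hxF
                    simpa [hk] using heq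
                  have hne : F.idxOf m ≠ F.idxOf x := by
                    intro he
                    exact hxm (idxOf_inj_of_mem F x m hxF hmF he.symm)
                  have : F.idxOf m < F.idxOf x := lt_of_le_of_ne hidx hne
                  show ((F.idxOf m : Nat) : Int) < ((F.idxOf x : Nat) : Int)
                  push_cast
                  omega
              · left
                show k x < (List.count m F : Int)
                have : k x < k m := lt_of_le_of_ne hle heq
                simpa [hk] using this
            · exact hbeat

  intro t best h1 h2 h3
  exact main t.length t le_rfl best h1 h2 h3

-- B's whole pipe on the list of firsts, as a standalone equation
theorem bSide (F : List String) (hF : F ≠ []) :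
    (bScan F (PySem.List.sorted F (fun x => x) false) (0, 0, none)).2.2.getD ""
    = (firstMax (fun y => (List.count y F : Int)) F).getD "" := by
  set k : String → Int := fun y => (List.count y F : Int) with hk
  rcases firstMax_some_of_ne_nil k F hF with ⟨m, hm⟩
  have hmF : m ∈ F := firstMax_mem k F m hm
  set s := PySem.List.sorted F (fun x => x) false with hs
  have hperm : s.Perm F := PySem.List.sorted_perm F (fun x => x) false
  have hsort : s.Pairwise (fun a b => a ≤ b) := PySem.List.sorted_pairwise F (fun x => x)
  have hres : (bScan F s (0, 0, none)).2.2 = some m := by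
    apply bScan_spec F m hm s (0, 0, none) hsort
    · intro y hy
      exact ⟨hperm.mem_iff.mp hy, hperm.count_eq y⟩
    · right
      refine ⟨hperm.mem_iff.mpr hmF, ?_⟩
      left
      show (0 : Int) < (List.count m F : Int)
      have : 0 < List.count m F := List.count_pos_iff.mpr hmF
      omega
  rw [hres, hm]

-- ===== VERDICT (by name: the statement is the Claim_ definition above) =====
theorem most_highscores_spec : Claim_equal_most_highscores := by
  intro scores _ hpre
  obtain ⟨hne, -⟩ := hpre
  unfold Spec_most_highscores
  have hmapfold :
      List.foldl (fun acc (i : String × List String) => acc ++ [(PySem.List.pyGet? i.2 0).getD ""]) [] scores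
      = scores.map (fun i => (PySem.List.pyGet? i.2 0).getD "") := by
    simpa using PySem.List.foldl_append_singleton_eq_map
      (fun (i : String × List String) => (PySem.List.pyGet? i.2 0).getD "") scores []
  have hA0 : most_highscores scores =
      (PySem.List.pyGet?
        (List.foldl (fun acc (i : String × List String) => acc ++ [(PySem.List.pyGet? i.2 0).getD ""]) [] scores)
        (((List.foldl (fun acc (i : String × List String) => acc ++ [(PySem.List.pyGet? i.2 0).getD ""]) [] scores).foldl
          (fun (s : Int × Int) i =>
            if ((PySem.List.count (List.foldl (fun acc (i : String × List String) => acc ++ [(PySem.List.pyGet? i.2 0).getD ""]) [] scores) i : Int)) > s.1 then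
              ((PySem.List.count (List.foldl (fun acc (i : String × List String) => acc ++ [(PySem.List.pyGet? i.2 0).getD ""]) [] scores) i : Int),
               (((PySem.List.index? (List.foldl (fun acc (i : String × List String) => acc ++ [(PySem.List.pyGet? i.2 0).getD ""]) [] scores) i).getD 0 : Nat) : Int))
            else s)
          (1, 0)).2)).getD "" := rfl
  have hB0 : most_highscores_alt scores =
      (bScan (scores.map (fun v => (PySem.List.pyGet? v.2 0).getD ""))
        (PySem.List.sorted (scores.map (fun v => (PySem.List.pyGet? v.2 0).getD "")) (fun x => x) false)
        (0, 0, none)).2.2.getD "" := rfl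
  rw [hA0, hB0, hmapfold]
  have hFne : scores.map (fun i => (PySem.List.pyGet? i.2 0).getD "") ≠ [] := by
    intro h; exact hne (List.map_eq_nil_iff.mp h)
  rw [aSide _ hFne, bSide _ hFne]
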